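-- pv_equiv track=rewrite | github.com/Janucas/Programacion-22-23 | ej14.py | buscarLarga
-- ===== SOURCE A (Python) =====
-- def buscarLarga(cadena):
--     caracteres2=0
--     cadenalarga=""
--     comparador=[]
--     repetidos=0
--     repetidos2=0
--     for i in cadena:
--         caracteres=len(i)
--         if caracteres > caracteres2:
--             caracteres2=caracteres
--             cadenalarga=i
--     for i in cadena:
--         if len(cadenalarga) == len(i):
--             comparador.append(i)
--     for i in comparador:
--         repetidos=0
--         for x in range(len(i)):
--             for z in range(1,len(i)):
--                 if i[x]==i[z]:
--                     repetidos+=1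
--         if repetidos > repetidos2:
--             repetidos2=repetidos
--             palabra=i
--     return palabra
-- ===== SOURCE B (Python) =====
-- def buscarLarga(cadena):
--     # One pass: keep (bestlen, bestscore, best); score computed in O(len) via char frequencies.
--     bestlen = 0
--     bestscore = -1
--     best = None
--     for s in cadena:
--         if len(s) < bestlen:
--             continue
--         f = {}
--         for c in s:
--             f[c] = f.get(c, 0) + 1
--         sc = 0
--         for c in s[1:]:
--             sc += f[c]
--         if len(s) > bestlen or sc > bestscore:
--             bestlen, bestscore, best = len(s), sc, s
--     return best
-- ===== Notes on version B (the rewrite author's own statement) =====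
-- stated objective: faster
-- what changed: Single pass keeping (best length, best repeat-score, best word), with the repeat count computed from a character-frequency dict as sum of f[c] over s[1:] instead of A's three passes with a quadruple-nested index comparison loop.
import Mathlib
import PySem

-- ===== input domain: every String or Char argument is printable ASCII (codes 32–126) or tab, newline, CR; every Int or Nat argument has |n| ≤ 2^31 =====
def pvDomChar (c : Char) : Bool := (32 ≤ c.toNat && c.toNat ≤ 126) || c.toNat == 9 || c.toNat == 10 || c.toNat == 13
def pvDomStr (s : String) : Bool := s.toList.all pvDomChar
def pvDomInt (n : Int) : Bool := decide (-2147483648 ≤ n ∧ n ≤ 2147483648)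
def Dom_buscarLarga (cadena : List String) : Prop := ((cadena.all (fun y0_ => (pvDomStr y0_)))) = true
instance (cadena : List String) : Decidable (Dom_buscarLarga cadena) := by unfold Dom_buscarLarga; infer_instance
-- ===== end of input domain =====

-- B replaces A's three passes and quadruple-nested index loop by a single pass whose repeat
-- count comes from a character-frequency dict (asymptotically faster in a timing run).

-- ===== PORT A =====
-- first loop: find the (first) longest string
def pvStep1 (st : Nat × String) (i : String) : Nat × String :=
  if i.toList.length > st.1 then (i.toList.length, i) else st

-- the nested 'for x in range(len(i)): for z in range(1, len(i))' repeat counter;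
-- indices produced by range are always in range, so List.getD is exact here
def pvCountRep (i : String) : Int :=
  let l := i.toList
  (List.range l.length).foldl (fun r x =>
    (List.range' 1 (l.length - 1)).foldl (fun r z =>
      if l.getD x ' ' = l.getD z ' ' then r + 1 else r) r) 0

-- third loop body: keep the first word strictly improving the repeat count
def pvStep3 (st : Int × Option String) (i : String) : Int × Option String :=
  let rep := pvCountRep i
  if rep > st.1 then (rep, some i) else st

def buscarLarga (cadena : List String) : String :=
  let st1 := cadena.foldl pvStep1 (0, "")
  let comparador := cadena.foldl
    (fun acc i => if st1.2.toList.length = i.toList.length then acc ++ [i] else acc)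
    ([] : List String)
  let st3 := comparador.foldl pvStep3 (0, (none : Option String))
  -- 'palabra' is unbound (Python raises) exactly when st3.2 = none; Pre_ excludes that
  st3.2.getD ""

-- ===== PORT B =====
-- O(len) repeat score: frequency dict f, then sum of f[c] over s[1:] (s[1:] = drop 1)
def pvAltScore (s : String) : Int :=
  let l := s.toList
  let f := l.foldl (fun (d : PySem.Dict Char Int) c => d.insert c (d.getD c 0 + 1)) PySem.Dict.empty
  (l.drop 1).foldl (fun a c => a + f.getD c 0) 0

def pvStepB (st : Nat × Int × Option String) (s : String) : Nat × Int × Option String :=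
  if s.toList.length < st.1 then st
  else
    let sc := pvAltScore s
    if s.toList.length > st.1 ∨ sc > st.2.1 then (s.toList.length, sc, some s) else st

def buscarLarga_alt (cadena : List String) : String :=
  -- Python's B returns None on input where no update fires (only possible for []); Pre_ excludes []
  (cadena.foldl pvStepB (0, -1, (none : Option String))).2.2.getD ""

-- ===== PRECONDITION & SPEC =====
-- Pre_ excludes exactly the inputs on which A raises UnboundLocalError ('palabra' never
-- assigned): those where no string has length ≥ 2 (every candidate's repeat count is 0).
def Pre_buscarLarga (cadena : List String) : Prop := ∃ s ∈ cadena, 2 ≤ s.toList.length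
instance (cadena : List String) : Decidable (Pre_buscarLarga cadena) := by
  unfold Pre_buscarLarga; infer_instance
def pvWitness_buscarLarga : List String := ["ab"]

def Spec_buscarLarga (cadena : List String) (out : String) : Prop := out = buscarLarga_alt cadena
instance (cadena : List String) (out : String) : Decidable (Spec_buscarLarga cadena out) := by
  unfold Spec_buscarLarga; infer_instance

-- ===== CLAIM (what is proved, stated in full; the proofs are below) =====
def Claim_equal_buscarLarga : Prop := ∀ (cadena : List String), Dom_buscarLarga cadena → Pre_buscarLarga cadena → Spec_buscarLarga cadena (buscarLarga cadena)

-- ===== LEMMAS AND PROOFS =====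

-- (range (l.length)).map (getD l) reproduces l
lemma pvMapGetDRange {α : Type} (l : List α) (d : α) :
    (List.range l.length).map (fun x => l.getD x d) = l := by
  apply List.ext_getElem
  · simp
  · intro i h1 h2
    simp [List.getElem?_eq_getElem h2]

lemma pvGetDDrop {α : Type} (l : List α) (d : α) (x : Nat) (h : x < (l.drop 1).length) :
    (l.drop 1).getD x d = l.getD (1 + x) d := by
  rw [List.getD_eq_getElem _ _ h, List.getD_eq_getElem _ _ (by simp at h ⊢; omega)]
  simp
  congr 1
  omega

lemma pvMapGetDRange' {α : Type} (l : List α) (d : α) :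
    (List.range' 1 (l.length - 1)).map (fun z => l.getD z d) = l.drop 1 := by
  have hlen : (l.drop 1).length = l.length - 1 := by simp
  rw [List.range'_eq_map_range, List.map_map, ← pvMapGetDRange (l.drop 1) d, hlen]
  apply List.map_congr_left
  intro x hx
  rw [List.mem_range] at hx
  simp only [Function.comp]
  rw [pvGetDDrop l d x (by omega)]

-- characterization of A's repeat counter
lemma pvCountRep_eq (s : String) :
    pvCountRep s = ((s.toList.map (fun c => ((s.toList.drop 1).count c : Int))).sum) := by
  unfold pvCountRep
  simp only []
  have hinner : ∀ (x : Nat) (r : Int), (List.range' 1 (s.toList.length - 1)).foldl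
      (fun r z => if s.toList.getD x ' ' = s.toList.getD z ' ' then r + 1 else r) r
      = r + ((s.toList.drop 1).count (s.toList.getD x ' ') : Int) := by
    intro x r
    rw [PySem.List.foldl_ite_add_one (fun z => s.toList.getD x ' ' = s.toList.getD z ' ')]
    congr 1
    have h1 : (List.range' 1 (s.toList.length - 1)).countP
          (fun z => decide (s.toList.getD x ' ' = s.toList.getD z ' '))
        = ((List.range' 1 (s.toList.length - 1)).map (fun z => s.toList.getD z ' ')).countP
            (fun y => decide (s.toList.getD x ' ' = y)) := by
      rw [List.countP_map]; rfl
    rw [h1, pvMapGetDRange', List.count_eq_countP]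
    norm_cast
    apply List.countP_congr
    intro y _
    by_cases hgy : s.toList.getD x ' ' = y
    · subst hgy; simp
    · have h2 : (y == s.toList.getD x ' ') = false := beq_eq_false_iff_ne.2 (Ne.symm hgy)
      rw [h2, decide_eq_false hgy]
  have hf : (fun (r : Int) (x : Nat) => (List.range' 1 (s.toList.length - 1)).foldl
        (fun r z => if s.toList.getD x ' ' = s.toList.getD z ' ' then r + 1 else r) r)
      = (fun r x => r + ((s.toList.drop 1).count (s.toList.getD x ' ') : Int)) := by
    funext r x; exact hinner x r
  rw [hf, PySem.List.foldl_add _ (fun x => ((s.toList.drop 1).count (s.toList.getD x ' ') : Int)) 0,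
    zero_add]
  rw [show (fun x => (((s.toList.drop 1).count (s.toList.getD x ' ') : Nat) : Int))
      = (fun c => (((s.toList.drop 1).count c : Nat) : Int)) ∘ (fun x => s.toList.getD x ' ') from rfl]
  rw [← List.map_map, pvMapGetDRange]

-- characterization of B's score
lemma pvAltScore_eq (s : String) :
    pvAltScore s = ((s.toList.drop 1).map (fun c => ((s.toList.count c : Int)))).sum := by
  unfold pvAltScore
  simp only [PySem.Dict.foldl_insert_getD_add_one_eq_counter]
  rw [PySem.List.foldl_add _ (fun c => (PySem.Dict.counter s.toList).getD c 0) 0, zero_add]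
  congr 1
  apply List.map_congr_left
  intro c _
  exact PySem.Dict.getD_counter _ _

-- double counting: Σ_{c∈u} count_v c = Σ_{c∈v} count_u c
lemma pvSumCountComm (u v : List Char) :
    (u.map (fun c => (v.count c : Int))).sum = (v.map (fun c => (u.count c : Int))).sum := by
  induction u with
  | nil => simp
  | cons a u ih =>
      simp only [List.map_cons, List.sum_cons, ih]
      have h1 : (v.map (fun c => (((a :: u).count c : Nat) : Int)))
          = v.map (fun c => (u.count c : Int) + if (c == a) then 1 else 0) := by
        apply List.map_congr_left
        intro c _
        by_cases hca : c = a
        · subst hca; simp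
        · have h1 : (c == a) = false := beq_eq_false_iff_ne.2 hca
          have h2 : (a == c) = false := beq_eq_false_iff_ne.2 (Ne.symm hca)
          simp [List.count_cons, h1, h2]
      rw [h1, PySem.List.sum_map_add_int, PySem.List.sum_map_ite_one_zero (fun c => c == a) v,
        ← List.count_eq_countP]
      ring

lemma pvScoreEq (s : String) : pvCountRep s = pvAltScore s := by
  rw [pvCountRep_eq, pvAltScore_eq, pvSumCountComm]

lemma pvScoreNonneg (s : String) : 0 ≤ pvAltScore s := by
  rw [pvAltScore_eq]
  apply List.sum_nonneg
  intro x hx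
  rw [List.mem_map] at hx
  obtain ⟨c, _, rfl⟩ := hx
  positivity

lemma pvSumGeLen (v : List Char) (f : Char → Int) (h : ∀ c ∈ v, 1 ≤ f c) :
    (v.length : Int) ≤ (v.map f).sum := by
  induction v with
  | nil => simp
  | cons a t ih =>
      simp only [List.map_cons, List.sum_cons, List.length_cons]
      have ha := h a (List.mem_cons_self ..)
      have ht := ih (fun c hc => h c (List.mem_cons_of_mem _ hc))
      push_cast
      omega

lemma pvScoreGe (s : String) : (s.toList.length : Int) - 1 ≤ pvAltScore s := by
  rw [pvAltScore_eq]
  cases h : s.toList with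
  | nil => simp
  | cons a t =>
      simp only [List.drop_succ_cons, List.drop_zero, List.length_cons]
      have := pvSumGeLen t (fun c => ((a :: t).count c : Int)) (by
        intro c hc
        have h1 : 0 < (a :: t).count c := List.count_pos_iff.2 (List.mem_cons_of_mem _ hc)
        show (1 : Int) ≤ ((a :: t).count c : Int)
        exact_mod_cast h1)
      push_cast at this ⊢
      omega

lemma pvSt1Len : ∀ (l : List String) (st : Nat × String), st.2.toList.length = st.1 →
    ((l.foldl pvStep1 st).2).toList.length = (l.foldl pvStep1 st).1 := by
  intro l
  induction l with
  | nil => intro st h; simpa using h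
  | cons a t ih =>
      intro st h
      simp only [List.foldl_cons]
      apply ih
      unfold pvStep1
      split <;> simp [h]

lemma pvSt1Mono : ∀ (l : List String) (st : Nat × String), st.1 ≤ (l.foldl pvStep1 st).1 := by
  intro l
  induction l with
  | nil => intro st; simp
  | cons a t ih =>
      intro st
      simp only [List.foldl_cons]
      refine le_trans ?_ (ih (pvStep1 st a))
      unfold pvStep1; split <;> omega

lemma pvSt1Le : ∀ (l : List String) (st : Nat × String) (s : String), s ∈ l →
    s.toList.length ≤ (l.foldl pvStep1 st).1 := by
  intro l
  induction l with
  | nil => intro st s h; simp at h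
  | cons a t ih =>
      intro st s h
      simp only [List.foldl_cons]
      rcases List.mem_cons.1 h with rfl | h
      · refine le_trans ?_ (pvSt1Mono t (pvStep1 st s))
        unfold pvStep1; split <;> omega
      · exact ih _ s h

-- the maximal length (value of caracteres2 after loop 1)
def pvM (l : List String) : Nat := (l.foldl pvStep1 (0, "")).1

lemma pvM_append (t : List String) (a : String) :
    pvM (t ++ [a]) = if a.toList.length > pvM t then a.toList.length else pvM t := by
  unfold pvM
  rw [List.foldl_append]
  simp only [List.foldl_cons, List.foldl_nil]
  unfold pvStep1
  split <;> rfl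

lemma pvM_le (t : List String) (s : String) (hs : s ∈ t) : s.toList.length ≤ pvM t :=
  pvSt1Le t (0, "") s hs

-- main invariant, by induction on the list from the right
lemma pvMain : ∀ (l : List String), l ≠ [] →
    ∃ S w, l.foldl pvStepB (0, -1, (none : Option String)) = (pvM l, S, some w)
      ∧ (l.filter (fun i => decide (pvM l = i.toList.length))).foldl pvStep3 (0, (none : Option String))
          = (S, if 0 < S then some w else none)
      ∧ 0 ≤ S ∧ (pvM l : Int) - 1 ≤ S := by
  intro l
  induction l using List.reverseRecOn with
  | nil => intro h; exact absurd rfl h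
  | append_singleton t a ih =>
      intro _
      rcases eq_or_ne t [] with rfl | ht
      · -- singleton list [a]
        simp only [List.nil_append]
        have hM : pvM [a] = a.toList.length := by
          unfold pvM pvStep1
          simp only [List.foldl_cons, List.foldl_nil]
          split <;> simp_all
        have h0 := pvScoreNonneg a
        refine ⟨pvAltScore a, a, ?_, ?_, h0, ?_⟩
        · simp only [List.foldl_cons, List.foldl_nil]
          unfold pvStepB
          simp only []
          rw [if_neg (show ¬ (a.toList.length < 0) by omega)]
          rw [if_pos (show a.toList.length > 0 ∨ pvAltScore a > -1 from Or.inr (by omega))]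
          rw [hM]
        · rw [List.filter_cons_of_pos (by simp [hM]), List.filter_nil]
          simp only [List.foldl_cons, List.foldl_nil]
          unfold pvStep3
          simp only []
          by_cases hpos : 0 < pvAltScore a
          · rw [if_pos (show pvCountRep a > 0 by rw [pvScoreEq]; omega), if_pos hpos, pvScoreEq]
          · have hz : pvAltScore a = 0 := le_antisymm (by omega) h0
            rw [if_neg (show ¬ pvCountRep a > 0 by rw [pvScoreEq]; omega), if_neg hpos, hz]
        · rw [hM]; exact pvScoreGe a
      · obtain ⟨S, w, hB, hA, hS0, hSM⟩ := ih ht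
        have hMapp := pvM_append t a
        have hBapp : (t ++ [a]).foldl pvStepB (0, -1, (none : Option String))
            = pvStepB (pvM t, S, some w) a := by
          rw [List.foldl_append, hB]; rfl
        have hfilapp : ∀ (n : Nat), (t ++ [a]).filter (fun i => decide (n = i.toList.length))
            = t.filter (fun i => decide (n = i.toList.length))
              ++ if n = a.toList.length then [a] else [] := by
          intro n
          rw [List.filter_append]
          congr 1
          by_cases hn : n = a.toList.length <;> simp_all
        rcases lt_trichotomy a.toList.length (pvM t) with h | h | h
        · -- shorter than the running maximum: both sides ignore a
          have hM' : pvM (t ++ [a]) = pvM t := by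
            rw [hMapp, if_neg (show ¬ (a.toList.length > pvM t) by omega)]
          refine ⟨S, w, ?_, ?_, hS0, by rw [hM']; exact hSM⟩
          · rw [hBapp, hM']
            unfold pvStepB
            rw [if_pos (show a.toList.length < (pvM t, S, some w).1 from h)]
          · rw [hM', hfilapp, if_neg (show ¬ (pvM t = a.toList.length) by omega),
              List.append_nil, hA]
        · -- same length as the maximum: a is a new candidate
          have hM' : pvM (t ++ [a]) = pvM t := by
            rw [hMapp, if_neg (show ¬ (a.toList.length > pvM t) by omega)]
          by_cases hsc : pvAltScore a > S
          · refine ⟨pvAltScore a, a, ?_, ?_, by omega, by rw [hM']; omega⟩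
            · rw [hBapp, hM']
              unfold pvStepB
              simp only []
              rw [if_neg (show ¬ (a.toList.length < pvM t) by omega)]
              rw [if_pos (show a.toList.length > pvM t ∨ pvAltScore a > S from Or.inr hsc)]
              rw [h]
            · rw [hM', hfilapp, if_pos h.symm, List.foldl_append, hA]
              simp only [List.foldl_cons, List.foldl_nil]
              unfold pvStep3
              simp only []
              rw [if_pos (show pvCountRep a > (S, if 0 < S then some w else none).1 by
                rw [pvScoreEq]; exact hsc)]
              rw [if_pos (show 0 < pvAltScore a by omega), pvScoreEq]
          · refine ⟨S, w, ?_, ?_, hS0, by rw [hM']; exact hSM⟩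
            · rw [hBapp, hM']
              unfold pvStepB
              simp only []
              rw [if_neg (show ¬ (a.toList.length < pvM t) by omega)]
              rw [if_neg (show ¬ (a.toList.length > pvM t ∨ pvAltScore a > S) by
                intro hor
                rcases hor with h1 | h2 <;> omega)]
            · rw [hM', hfilapp, if_pos h.symm, List.foldl_append, hA]
              simp only [List.foldl_cons, List.foldl_nil]
              unfold pvStep3
              simp only []
              rw [if_neg (show ¬ (pvCountRep a > (S, if 0 < S then some w else none).1) by
                rw [pvScoreEq]; exact hsc)]
        · -- longer than everything before: the candidate set collapses to [a]
          have hM' : pvM (t ++ [a]) = a.toList.length := by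
            rw [hMapp, if_pos (show a.toList.length > pvM t from h)]
          have h0 := pvScoreNonneg a
          refine ⟨pvAltScore a, a, ?_, ?_, h0, by rw [hM']; exact pvScoreGe a⟩
          · rw [hBapp, hM']
            unfold pvStepB
            simp only []
            rw [if_neg (show ¬ (a.toList.length < pvM t) by omega)]
            rw [if_pos (show a.toList.length > pvM t ∨ pvAltScore a > S from Or.inl h)]
          · have hnil : t.filter (fun i => decide (a.toList.length = i.toList.length)) = [] := by
              rw [List.filter_eq_nil_iff]
              intro s hs
              have := pvM_le t s hs
              simp only [decide_eq_true_eq]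
              omega
            rw [hM', hfilapp, hnil, if_pos rfl, List.nil_append]
            simp only [List.foldl_cons, List.foldl_nil]
            unfold pvStep3
            simp only []
            by_cases hpos : 0 < pvAltScore a
            · rw [if_pos (show pvCountRep a > 0 by rw [pvScoreEq]; omega), if_pos hpos, pvScoreEq]
            · have hz : pvAltScore a = 0 := le_antisymm (by omega) h0
              rw [if_neg (show ¬ (pvCountRep a > 0) by rw [pvScoreEq]; omega), if_neg hpos, hz]

-- ===== VERDICT (by name: the statement is the Claim_ definition above) =====
theorem buscarLarga_spec : Claim_equal_buscarLarga := by
  intro cadena _ hpre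
  obtain ⟨s, hs, hs2⟩ := hpre
  have hne : cadena ≠ [] := by rintro rfl; simp at hs
  obtain ⟨S, w, hB, hA, hS0, hSM⟩ := pvMain cadena hne
  have hM2 : 2 ≤ pvM cadena := le_trans hs2 (pvM_le cadena s hs)
  have hM2' : (2 : Int) ≤ (pvM cadena : Int) := by exact_mod_cast hM2
  have hSpos : 0 < S := by omega
  have hlen : ((cadena.foldl pvStep1 (0, "")).2).toList.length = pvM cadena :=
    pvSt1Len cadena (0, "") (by simp)
  unfold Spec_buscarLarga buscarLarga buscarLarga_alt
  simp only []
  rw [PySem.List.foldl_append_ite_eq_filter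
    (fun i => ((cadena.foldl pvStep1 (0, "")).2).toList.length = i.toList.length) cadena []]
  rw [List.nil_append, hlen, hA, if_pos hSpos, hB]
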